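-- pv_equiv track=rewrite | github.com/woobrendan/sro_sign_in | csv_converter.py | sortBySeries
-- ===== SOURCE A (Python) =====
-- def sortBySeries(entry_arr):
--     series = {}
--     for entry in entry_arr:
--         series_name = entry['series']
--
--         #  return array of entries if key exists, else return empty arr
--         series_entries = series.get(series_name, [])
--         series_entries.append(entry)
--         series[series_name] = series_entries
--
--     return series
-- ===== SOURCE B (Python) =====
-- def sortBySeries(entry_arr):
--     # two-pass: first-appearance-ordered distinct series names, then one filter per name
--     names = list(dict.fromkeys(entry['series'] for entry in entry_arr))
--     return {name: [e for e in entry_arr if e['series'] == name] for name in names}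
-- ===== Notes on version B (the rewrite author's own statement) =====
-- stated objective: alternative
-- what changed: Replaces the single hash-bucketing pass (get-default/append/reinsert per entry) with a two-pass scheme: dedup the series names in first-appearance order, then build each group with one filter comprehension over the whole list.
import Mathlib
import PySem

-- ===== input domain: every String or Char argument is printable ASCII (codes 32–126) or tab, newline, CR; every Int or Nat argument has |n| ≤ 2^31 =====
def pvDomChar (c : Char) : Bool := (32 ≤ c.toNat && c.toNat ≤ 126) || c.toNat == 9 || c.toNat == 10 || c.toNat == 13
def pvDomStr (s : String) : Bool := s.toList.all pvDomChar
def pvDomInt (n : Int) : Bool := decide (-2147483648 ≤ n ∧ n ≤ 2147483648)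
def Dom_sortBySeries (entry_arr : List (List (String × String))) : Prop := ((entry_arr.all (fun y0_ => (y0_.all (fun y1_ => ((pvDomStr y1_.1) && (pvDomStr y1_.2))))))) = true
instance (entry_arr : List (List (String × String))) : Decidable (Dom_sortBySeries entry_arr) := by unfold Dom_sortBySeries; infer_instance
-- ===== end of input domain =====

-- B changes only the grouping strategy (dedup names, then one filter per name); return value proved equal.

-- entry['series'] for an entry given as an association list (first match; Pre_ guarantees the key is present)
def pvSeries (entry : List (String × String)) : String :=
  ((entry.find? (fun p => p.1 == "series")).map (·.2)).getD ""

-- ===== PORT A =====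
def sortBySeries (entry_arr : List (List (String × String))) : List (String × List (List (String × String))) :=
  (entry_arr.foldl
    (fun series entry =>
      let series_name := pvSeries entry
      let series_entries := series.getD series_name []
      series.insert series_name (series_entries ++ [entry]))
    (PySem.Dict.empty : PySem.Dict String (List (List (String × String))))).items

-- ===== PORT B =====
def sortBySeries_alt (entry_arr : List (List (String × String))) : List (String × List (List (String × String))) :=
  let names := PySem.Set.ofList (entry_arr.map pvSeries)
  names.map (fun name => (name, entry_arr.filter (fun e => pvSeries e == name)))

-- ===== PRECONDITION & SPEC =====
-- Pre_ excludes exactly the inputs where some entry lacks the 'series' key: both Pythons raise KeyError there.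
def Pre_sortBySeries (entry_arr : List (List (String × String))) : Prop :=
  (entry_arr.all (fun e => e.any (fun p => p.1 == "series"))) = true
instance (entry_arr : List (List (String × String))) : Decidable (Pre_sortBySeries entry_arr) := by unfold Pre_sortBySeries; infer_instance

def pvWitness_sortBySeries : (List (List (String × String))) :=
  [[("series", "gt"), ("name", "bob")], [("series", "tc")], [("series", "gt"), ("name", "amy")]]

def Spec_sortBySeries (entry_arr : List (List (String × String))) (out : List (String × List (List (String × String)))) : Prop := out = sortBySeries_alt entry_arr
instance (entry_arr : List (List (String × String))) (out : List (String × List (List (String × String)))) : Decidable (Spec_sortBySeries entry_arr out) := by unfold Spec_sortBySeries; infer_instance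

-- ===== CLAIM (what is proved, stated in full; the proofs are below) =====
def Claim_equal_sortBySeries : Prop := ∀ (entry_arr : List (List (String × String))), Dom_sortBySeries entry_arr → Pre_sortBySeries entry_arr → Spec_sortBySeries entry_arr (sortBySeries entry_arr)

-- ===== LEMMAS AND PROOFS =====

-- the A-side loop's lookup at any key c is the prior value followed by the filtered suffix
lemma foldl_getD_series (l : List (List (String × String)))
    (d : PySem.Dict String (List (List (String × String)))) (c : String) :
    (l.foldl
      (fun series entry =>
        let series_name := pvSeries entry
        let series_entries := series.getD series_name []
        series.insert series_name (series_entries ++ [entry])) d).getD c []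
    = d.getD c [] ++ l.filter (fun e => pvSeries e == c) := by
  induction l generalizing d with
  | nil => simp
  | cons e t ih =>
    simp only [List.foldl_cons, ih, List.filter_cons]
    by_cases h : pvSeries e = c
    · simp [h]
    · have : (pvSeries e == c) = false := by simp [h]
      simp [PySem.Dict.getD_insert, Ne.symm h, this]

lemma foldl_keys_series (l : List (List (String × String))) :
    (l.foldl
      (fun series entry =>
        let series_name := pvSeries entry
        let series_entries := series.getD series_name []
        series.insert series_name (series_entries ++ [entry]))
      (PySem.Dict.empty : PySem.Dict String (List (List (String × String))))).keys
    = PySem.Set.ofList (l.map pvSeries) := by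
  have h := PySem.Dict.keys_foldl_insert_key l pvSeries
      (fun (series : PySem.Dict String (List (List (String × String)))) entry =>
        series.getD (pvSeries entry) [] ++ [entry])
      PySem.Dict.empty
  simpa [PySem.Dict.keys_empty, PySem.Set.update, PySem.Set.ofList_eq_foldl] using h

lemma foldl_keys_nodup (l : List (List (String × String))) :
    (l.foldl
      (fun series entry =>
        let series_name := pvSeries entry
        let series_entries := series.getD series_name []
        series.insert series_name (series_entries ++ [entry]))
      (PySem.Dict.empty : PySem.Dict String (List (List (String × String))))).keys.Nodup := by
  exact PySem.Dict.nodup_keys_foldl_insert_key l pvSeries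
    (fun series entry => series.getD (pvSeries entry) [] ++ [entry])
    PySem.Dict.empty PySem.Dict.nodup_keys_empty

-- ===== VERDICT (by name: the statement is the Claim_ definition above) =====
theorem sortBySeries_spec : Claim_equal_sortBySeries := by
  intro entry_arr _ _
  unfold Spec_sortBySeries sortBySeries sortBySeries_alt
  rw [PySem.Dict.items_eq_map_keys _ (foldl_keys_nodup entry_arr) ([] : List (List (String × String)))]
  rw [foldl_keys_series]
  apply List.map_congr_left
  intro k _
  rw [foldl_getD_series]
  simp
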